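-- pv_equiv track=rewrite | github.com/nds-group/Dune | model_partitioning/src/SPP/partitioning.py | __next_partition
-- ===== SOURCE A (Python) =====
-- def __is_valid_prefix(sequence):
--     max_val = 1
--     for val in sequence:
--         if val > max_val:
--             return False
--         max_val = max(max_val, val + 1)
--     return True
--
-- def __next_partition(sequence):
--     n = len(sequence)
--     for i in range(n - 1, -1, -1):
--         max_val = max(sequence[:i + 1]) + 1
--         for new_val in range(sequence[i] + 1, max_val + 1):
--             new_sequence = sequence[:i] + [new_val] + [1] * (n - i - 1)
--             if __is_valid_prefix(new_sequence):
--                 return new_sequence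
--     return None
-- ===== SOURCE B (Python) =====
-- def __next_partition(sequence):
--     # One left-to-right pass over the running RGS bound m: the answer increments the
--     # rightmost position i whose prefix is a valid RGS-prefix and whose value is below m,
--     # and resets the suffix to ones.
--     m = 1
--     best = None
--     for i, v in enumerate(sequence):
--         if v < m:
--             best = i
--         if v > m:
--             break
--         m = max(m, v + 1)
--     if best is None:
--         return None
--     return sequence[:best] + [sequence[best] + 1] + [1] * (len(sequence) - best - 1)
-- ===== Notes on version B (the rewrite author's own statement) =====
-- stated objective: faster
-- what changed: Replaces the quadratic right-to-left search (each step recomputing a prefix max, rebuilding candidate sequences and re-validating them) by a single left-to-right pass that maintains the running RGS bound and remembers the rightmost incrementable position, then builds the successor once.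
import Mathlib
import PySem

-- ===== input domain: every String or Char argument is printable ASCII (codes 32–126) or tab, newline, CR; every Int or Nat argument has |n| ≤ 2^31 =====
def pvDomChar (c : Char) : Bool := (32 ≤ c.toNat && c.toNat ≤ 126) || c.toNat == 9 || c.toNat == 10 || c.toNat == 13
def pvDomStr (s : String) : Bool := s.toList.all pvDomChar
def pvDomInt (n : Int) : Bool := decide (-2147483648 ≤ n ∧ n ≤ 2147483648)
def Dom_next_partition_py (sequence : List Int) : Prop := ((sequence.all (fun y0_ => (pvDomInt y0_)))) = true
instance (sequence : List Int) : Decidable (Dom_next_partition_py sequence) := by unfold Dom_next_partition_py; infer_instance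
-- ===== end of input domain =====

-- B replaces A's quadratic right-to-left candidate search by one linear left-to-right pass
-- maintaining the running restricted-growth bound (objective: faster, O(n) vs O(n^2)).

-- ===== PORT A =====
-- __is_valid_prefix; the Python local max_val (initially 1) is the accumulator
def pvValidA : List Int → Int → Bool
  | [], _ => true
  | v :: rest, maxVal => if v > maxVal then false else pvValidA rest (max maxVal (v + 1))

-- inner 'for new_val in range(sequence[i]+1, max_val+1)' loop; the argument list is the
-- remaining range; new_sequence = sequence[:i] + [new_val] + [1]*(n-i-1)
def pvInnerA (pre ones : List Int) : List Int → Option (List Int)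
  | [] => none
  | newVal :: rest =>
    let newSeq := pre ++ [newVal] ++ ones
    if pvValidA newSeq 1 then some newSeq else pvInnerA pre ones rest

-- outer 'for i in range(n-1, -1, -1)' loop: fuel = i+1, the step visits index i.
-- i ≥ 0 throughout, so sequence[:i+1] = take (i+1), sequence[:i] = take i, and
-- sequence[i] = getElem? i (always in range, so max() never raises and getD is never hit).
def pvOuterA (sequence : List Int) (n : Nat) : Nat → Option (List Int)
  | 0 => none
  | i + 1 =>
    let maxVal := (PySem.List.max? (sequence.take (i + 1)) id).getD 0 + 1
    let si := sequence[i]?.getD 0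
    match pvInnerA (sequence.take i) (List.replicate (n - i - 1) 1)
        (PySem.List.pyRange (si + 1) (maxVal + 1) 1) with
    | some r => some r
    | none => pvOuterA sequence n i

def next_partition_py (sequence : List Int) : Option (List Int) :=
  pvOuterA sequence sequence.length sequence.length

-- ===== PORT B =====
-- Source B's single left-to-right pass: i is the enumerate index, m the running RGS bound,
-- best the rightmost incrementable position seen so far; 'break' returns best'.
def pvLoopB : List Int → Nat → Int → Option Nat → Option Nat
  | [], _, _, best => best
  | v :: rest, i, m, best =>
    let best' := if v < m then some i else best
    if v > m then best'
    else pvLoopB rest (i + 1) (max m (v + 1)) best'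

-- best (when some) is always < length, so getElem? is in range and getD is never hit
def next_partition_py_alt (sequence : List Int) : Option (List Int) :=
  match pvLoopB sequence 0 1 none with
  | none => none
  | some b =>
    some (sequence.take b ++ [sequence[b]?.getD 0 + 1]
          ++ List.replicate (sequence.length - b - 1) 1)

-- ===== PRECONDITION & SPEC =====
def Spec_next_partition_py (sequence : List Int) (out : Option (List Int)) : Prop := out = next_partition_py_alt sequence
instance (sequence : List Int) (out : Option (List Int)) : Decidable (Spec_next_partition_py sequence out) := by unfold Spec_next_partition_py; infer_instance

-- ===== CLAIM (what is proved, stated in full; the proofs are below) =====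
def Claim_equal_next_partition_py : Prop := ∀ (sequence : List Int), Dom_next_partition_py sequence → Spec_next_partition_py sequence (next_partition_py sequence)

-- ===== LEMMAS AND PROOFS =====

-- running restricted-growth bound after reading p, starting from m
def pvRunMax (m : Int) (p : List Int) : Int := p.foldl (fun m v => max m (v + 1)) m

-- position i is incrementable: its prefix is a valid RGS-prefix and its value is below the bound
def pvCond (seq : List Int) (i : Nat) : Bool :=
  pvValidA (seq.take i) 1 && decide (seq[i]?.getD 0 < pvRunMax 1 (seq.take i))

-- rightmost incrementable position among 0..f-1
def pvBest (seq : List Int) : Nat → Option Nat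
  | 0 => none
  | i + 1 => if pvCond seq i then some i else pvBest seq i

def pvCand (seq : List Int) (b : Nat) : List Int :=
  seq.take b ++ [seq[b]?.getD 0 + 1] ++ List.replicate (seq.length - b - 1) 1

theorem pvRunMax_le (m : Int) (p : List Int) : m ≤ pvRunMax m p := by
  induction p generalizing m with
  | nil => simp [pvRunMax]
  | cons v rest ih =>
    have h := ih (max m (v + 1))
    simp only [pvRunMax, List.foldl_cons] at h ⊢
    exact le_trans (le_max_left _ _) h

theorem pvValidA_append (p q : List Int) (m : Int) :
    pvValidA (p ++ q) m = (pvValidA p m && pvValidA q (pvRunMax m p)) := by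
  induction p generalizing m with
  | nil => simp [pvValidA, pvRunMax]
  | cons v rest ih =>
    simp only [List.cons_append, pvValidA, pvRunMax, List.foldl_cons]
    split_ifs with h
    · simp
    · exact ih (max m (v + 1))

theorem pvValidA_replicate (k : Nat) (m : Int) (hm : 1 ≤ m) :
    pvValidA (List.replicate k 1) m = true := by
  induction k generalizing m with
  | zero => simp [pvValidA]
  | succ k ih =>
    simp only [List.replicate_succ, pvValidA]
    have : ¬ (1 : Int) > m := by omega
    simp only [if_neg this]
    exact ih _ (le_trans hm (le_max_left _ _))

theorem pvValidA_cand (p : List Int) (w : Int) (k : Nat) :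
    pvValidA (p ++ [w] ++ List.replicate k 1) 1
      = (pvValidA p 1 && decide (w ≤ pvRunMax 1 p)) := by
  rw [List.append_assoc, pvValidA_append]
  congr 1
  simp only [List.cons_append, List.nil_append, pvValidA]
  split_ifs with h
  · simp; omega
  · rw [pvValidA_replicate]
    · simp; omega
    · exact le_trans (le_trans (by norm_num) (pvRunMax_le 1 p)) (le_max_left _ _)

theorem pvInnerA_none (p : List Int) (k : Nat) (a b : Int)
    (h : pvValidA p 1 = false ∨ pvRunMax 1 p < a) :
    pvInnerA p (List.replicate k 1) (PySem.List.pyRange a b 1) = none := by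
  by_cases hab : b ≤ a
  · rw [PySem.List.pyRange_one_eq_nil hab]; rfl
  · have hab2 : a < b := by omega
    rw [PySem.List.pyRange_one_cons hab2]
    simp only [pvInnerA]
    rw [pvValidA_cand]
    have hfalse : (pvValidA p 1 && decide (a ≤ pvRunMax 1 p)) = false := by
      rcases h with h | h
      · simp [h]
      · simp; omega
    rw [hfalse]
    simp only [Bool.false_eq_true, if_false]
    apply pvInnerA_none p k (a + 1) b
    rcases h with h | h
    · exact Or.inl h
    · exact Or.inr (by omega)
termination_by (b - a).toNat
decreasing_by omega

theorem pvInnerA_some (p : List Int) (k : Nat) (a b : Int)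
    (hp : pvValidA p 1 = true) (ha : a ≤ pvRunMax 1 p) (hab : a < b) :
    pvInnerA p (List.replicate k 1) (PySem.List.pyRange a b 1)
      = some (p ++ [a] ++ List.replicate k 1) := by
  rw [PySem.List.pyRange_one_cons hab]
  simp only [pvInnerA]
  rw [pvValidA_cand, hp]
  simp [ha]

theorem pvFoldlSome {α : Type} (f : Option α → α → Option α)
    (hf : ∀ a x, (f (some a) x).isSome) (xs : List α) (a : α) :
    (List.foldl f (some a) xs).isSome := by
  induction xs generalizing a with
  | nil => simp
  | cons x rest ih =>
    simp only [List.foldl_cons]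
    have := hf a x
    cases h : f (some a) x with
    | none => rw [h] at this; simp at this
    | some a' => exact ih a'

theorem pvMax?_some (x : Int) (xs : List Int) :
    ∃ m, PySem.List.max? (x :: xs) id = some m := by
  have : (PySem.List.max? (x :: xs) id).isSome := by
    simp only [PySem.List.max?, List.foldl_cons]
    exact pvFoldlSome _ (by intro a y; dsimp only; split <;> simp) xs x
  cases h : PySem.List.max? (x :: xs) id with
  | none => rw [h] at this; simp at this
  | some m => exact ⟨m, rfl⟩

-- A's outer step at fuel i+1, for i < length: it succeeds exactly on pvCond
theorem pvOuterA_step (seq : List Int) (n : Nat) (i : Nat) (hi : i < seq.length) :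
    pvOuterA seq n (i + 1)
      = if pvCond seq i
          then some (seq.take i ++ [seq[i]?.getD 0 + 1] ++ List.replicate (n - i - 1) 1)
          else pvOuterA seq n i := by
  have htake : seq.take (i + 1) = seq.take i ++ [seq[i]] := List.take_succ_eq_append_getElem hi
  have hget : seq[i]? = some seq[i] := List.getElem?_eq_getElem hi
  have hne : seq.take (i + 1) ≠ [] := by
    intro h
    have := congrArg List.length h
    rw [htake] at this
    simp at this
    subst this
    simp at hi
  obtain ⟨x, xs, hx⟩ := List.exists_cons_of_ne_nil hne
  obtain ⟨mx, hmx⟩ := pvMax?_some x xs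
  have hmem : seq[i] ∈ seq.take (i + 1) := by
    rw [htake]
    exact List.mem_append_right _ (List.mem_singleton_self _)
  have hle : seq[i] ≤ mx := by
    have := PySem.List.max?_isMax (xs := seq.take (i+1)) (key := id) (m := mx)
      (by rw [hx]; exact hmx) seq[i] hmem
    simpa using this
  simp only [pvOuterA, hx, hmx, Option.getD_some, hget]
  by_cases hc : pvCond seq i = true
  · have ⟨hv, hlt⟩ : pvValidA (seq.take i) 1 = true ∧ seq[i] < pvRunMax 1 (seq.take i) := by
      have := hc; simp [pvCond, hget] at this; exact this
    rw [pvInnerA_some _ _ _ _ hv (by omega) (by omega)]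
    simp [hc]
  · have : pvValidA (seq.take i) 1 = false ∨ pvRunMax 1 (seq.take i) < seq[i] + 1 := by
      simp [pvCond, hget] at hc
      by_cases hv : pvValidA (seq.take i) 1 = true
      · exact Or.inr (by have := hc hv; omega)
      · exact Or.inl (by simpa using hv)
    rw [pvInnerA_none _ _ _ _ this]
    simp [hc]

theorem pvOuterA_eq_best (seq : List Int) (f : Nat) (hf : f ≤ seq.length) :
    pvOuterA seq seq.length f = (pvBest seq f).map (pvCand seq) := by
  induction f with
  | zero => rfl
  | succ i ih =>
    rw [pvOuterA_step seq seq.length i (by omega), pvBest]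
    split_ifs with hc
    · simp [pvCand]
    · exact ih (by omega)

theorem pvBest_stable (seq : List Int) (i f : Nat) (hif : i ≤ f)
    (h : ∀ j, i ≤ j → pvCond seq j = false) :
    pvBest seq f = pvBest seq i := by
  induction f with
  | zero => cases Nat.le_zero.mp hif; rfl
  | succ f ihf =>
    by_cases hfi : i = f + 1
    · rw [hfi]
    · have : i ≤ f := by omega
      rw [pvBest, h f this, ihf this]
      simp

theorem pvTake_long (p : List Int) (v : Int) (r : List Int) (j : Nat) (hj : p.length + 1 ≤ j) :
    (p ++ v :: r).take j = p ++ v :: r.take (j - p.length - 1) := by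
  induction p generalizing j with
  | nil =>
    obtain ⟨t, rfl⟩ : ∃ t, j = t + 1 := ⟨j - 1, by simp at hj; omega⟩
    simp
  | cons a p ih =>
    obtain ⟨t, rfl⟩ : ∃ t, j = t + 1 := ⟨j - 1, by simp at hj; omega⟩
    have hj' : p.length + 1 ≤ t := by simp at hj; omega
    simp only [List.cons_append, List.take_succ_cons, ih t hj', List.length_cons]
    have hidx : t + 1 - (p.length + 1) - 1 = t - p.length - 1 := by omega
    rw [hidx]

-- B's loop invariant: with a processed valid prefix p, the loop from rest computes
-- the rightmost incrementable position of the whole sequence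
theorem pvLoopB_inv (rest p : List Int) (hp : pvValidA p 1 = true) :
    pvLoopB rest p.length (pvRunMax 1 p) (pvBest (p ++ rest) p.length)
      = pvBest (p ++ rest) (p ++ rest).length := by
  induction rest generalizing p with
  | nil => simp [pvLoopB]
  | cons v r ih =>
    set seq := p ++ v :: r with hseq
    have htake : seq.take p.length = p := by simp [hseq]
    have hget : seq[p.length]? = some v := by
      rw [hseq, List.getElem?_append_right (by omega)]
      simp
    have hcond : pvCond seq p.length = decide (v < pvRunMax 1 p) := by
      simp [pvCond, htake, hget, hp]
    have hbest' :
        (if v < pvRunMax 1 p then some p.length else pvBest seq p.length)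
          = pvBest seq (p.length + 1) := by
      rw [pvBest, hcond]
      rcases Classical.em (v < pvRunMax 1 p) with hvm | hvm
      · simp [hvm]
      · simp [hvm]
    simp only [pvLoopB]
    rw [hbest']
    by_cases hv : v > pvRunMax 1 p
    · simp only [if_pos hv]
      refine (pvBest_stable seq (p.length + 1) seq.length (by simp [hseq]) ?_).symm
      intro j hj
      have htj : seq.take j = p ++ v :: (r.take (j - p.length - 1)) := pvTake_long p v r j hj
      simp only [pvCond, htj]
      rw [show p ++ v :: (r.take (j - p.length - 1)) = p ++ [v] ++ (r.take (j - p.length - 1)) by simp,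
        pvValidA_append, pvValidA_append]
      have : pvValidA [v] (pvRunMax 1 p) = false := by
        simp [pvValidA]; omega
      simp [this]
    · simp only [if_neg hv]
      have hp' : pvValidA (p ++ [v]) 1 = true := by
        rw [pvValidA_append, hp]
        simp [pvValidA]; omega
      have hrun : pvRunMax 1 (p ++ [v]) = max (pvRunMax 1 p) (v + 1) := by
        simp [pvRunMax]
      have := ih (p ++ [v]) hp'
      simp only [List.length_append, List.length_singleton] at this
      rw [hrun] at this
      have hlen : p.length + 1 + r.length = p.length + (r.length + 1) := by omega
      rw [hlen] at this
      simpa [hseq] using this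

theorem pvLoopB_eq_best (seq : List Int) :
    pvLoopB seq 0 1 none = pvBest seq seq.length := by
  have := pvLoopB_inv seq [] (by rfl)
  simpa [pvRunMax, pvBest] using this

-- ===== VERDICT (by name: the statement is the Claim_ definition above) =====
theorem next_partition_py_spec : Claim_equal_next_partition_py := by
  intro seq _
  unfold Spec_next_partition_py next_partition_py next_partition_py_alt
  rw [pvOuterA_eq_best seq seq.length le_rfl, pvLoopB_eq_best]
  cases pvBest seq seq.length with
  | none => rfl
  | some b => simp [pvCand]
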